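-- pv_equiv track=rewrite | github.com/ikram7hoss/Back-end-Python- | Tp.py | construire_notes_par_etudiant
-- ===== SOURCE A (Python) =====
-- def construire_notes_par_etudiant(valides):
--     """
--     Retourne un dict hiérarchique :
--       { nom_etudiant : { matiere : [note, ...] } }
--     """
--     notes = {}
--     for nom, matiere, note, _ in valides:
--         if nom not in notes:
--             notes[nom] = {}
--         if matiere not in notes[nom]:
--             notes[nom][matiere] = []
--         notes[nom][matiere].append(note)
--     return notes
-- ===== SOURCE B (Python) =====
-- def construire_notes_par_etudiant(valides):
--     """
--     Retourne un dict hiérarchique :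
--       { nom_etudiant : { matiere : [note, ...] } }
--     Décomposition différente : déduplication des clés (ordre de première
--     apparition) puis compréhensions filtrantes, au lieu d'une construction
--     incrémentale de dicts imbriqués.
--     """
--     noms = list(dict.fromkeys(nom for nom, _, _, _ in valides))
--     return {
--         nom: {
--             mat: [note for nm, m, note, _ in valides if nm == nom and m == mat]
--             for mat in dict.fromkeys(m for nm, m, _, _ in valides if nm == nom)
--         }
--         for nom in noms
--     }
-- ===== Notes on version B (the rewrite author's own statement) =====
-- stated objective: alternative
-- what changed: B replaces A's single-pass incremental nested-dict construction by a declarative decomposition: dedup the student names (first-occurrence order, dict.fromkeys), dedup each student's subjects, and rebuild every note list by a filtering comprehension over the whole input.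
import Mathlib
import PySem

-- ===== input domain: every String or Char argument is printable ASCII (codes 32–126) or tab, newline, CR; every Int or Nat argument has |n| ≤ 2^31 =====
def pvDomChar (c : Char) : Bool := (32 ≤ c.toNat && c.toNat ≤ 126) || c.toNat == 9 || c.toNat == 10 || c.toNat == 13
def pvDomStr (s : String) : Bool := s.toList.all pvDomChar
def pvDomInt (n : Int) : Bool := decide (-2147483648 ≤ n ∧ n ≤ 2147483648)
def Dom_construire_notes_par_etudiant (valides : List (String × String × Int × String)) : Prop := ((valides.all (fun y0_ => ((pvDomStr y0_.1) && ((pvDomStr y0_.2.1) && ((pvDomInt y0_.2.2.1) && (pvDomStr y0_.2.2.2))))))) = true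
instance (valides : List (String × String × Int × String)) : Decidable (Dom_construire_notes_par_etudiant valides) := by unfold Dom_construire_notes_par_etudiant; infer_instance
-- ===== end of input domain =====

-- B rebuilds the nested dict declaratively (deduped keys + filtering comprehensions)
-- instead of A's incremental nested-dict construction; alternative decomposition, not faster.

-- ===== PORT A =====
-- loop body of A's single for-loop (one Python iteration, dicts as PySem.Dict)
def pvStepA (notes : PySem.Dict String (PySem.Dict String (List Int)))
    (t : String × String × Int × String) : PySem.Dict String (PySem.Dict String (List Int)) :=
  let nom := t.1
  let matiere := t.2.1
  let note := t.2.2.1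
  -- if nom not in notes: notes[nom] = {}
  let notes := if notes.contains nom then notes else notes.insert nom PySem.Dict.empty
  -- if matiere not in notes[nom]: notes[nom][matiere] = []
  let inner := notes.getD nom PySem.Dict.empty
  let inner := if inner.contains matiere then inner else inner.insert matiere ([] : List Int)
  -- notes[nom][matiere].append(note)
  let inner := inner.insert matiere (inner.getD matiere [] ++ [note])
  notes.insert nom inner

def construire_notes_par_etudiant (valides : List (String × String × Int × String)) : List (String × List (String × List Int)) :=
  let notes := valides.foldl pvStepA PySem.Dict.empty
  notes.items.map (fun p => (p.1, p.2.items))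

-- ===== PORT B =====
def construire_notes_par_etudiant_alt (valides : List (String × String × Int × String)) : List (String × List (String × List Int)) :=
  (PySem.List.dedup (valides.map (fun t => t.1))).map (fun nom =>
    (nom,
      (PySem.List.dedup ((valides.filter (fun t => t.1 == nom)).map (fun t => t.2.1))).map (fun mat =>
        (mat, (valides.filter (fun t => t.1 == nom && t.2.1 == mat)).map (fun t => t.2.2.1)))))

-- ===== PRECONDITION & SPEC =====
def Spec_construire_notes_par_etudiant (valides : List (String × String × Int × String)) (out : List (String × List (String × List Int))) : Prop := out = construire_notes_par_etudiant_alt valides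
instance (valides : List (String × String × Int × String)) (out : List (String × List (String × List Int))) : Decidable (Spec_construire_notes_par_etudiant valides out) := by unfold Spec_construire_notes_par_etudiant; infer_instance

-- ===== CLAIM (what is proved, stated in full; the proofs are below) =====
def Claim_equal_construire_notes_par_etudiant : Prop := ∀ (valides : List (String × String × Int × String)), Dom_construire_notes_par_etudiant valides → Spec_construire_notes_par_etudiant valides (construire_notes_par_etudiant valides)


-- ===== LEMMAS AND PROOFS =====

-- the note list B computes for one (student, subject) pair
def pvNotesOf (l : List (String × String × Int × String)) (nom mat : String) : List Int :=
  (l.filter (fun t => t.1 == nom && t.2.1 == mat)).map (fun t => t.2.2.1)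

-- the inner association list B computes for one student
def pvInner (l : List (String × String × Int × String)) (nom : String) : List (String × List Int) :=
  (PySem.List.dedup ((l.filter (fun t => t.1 == nom)).map (fun t => t.2.1))).map (fun mat =>
    (mat, pvNotesOf l nom mat))

-- the full dict state A's loop has after processing l
def pvOuter (l : List (String × String × Int × String)) : PySem.Dict String (PySem.Dict String (List Int)) :=
  PySem.Dict.mk ((PySem.List.dedup (l.map (fun t => t.1))).map (fun nom => (nom, PySem.Dict.mk (pvInner l nom))))

-- generic facts about a dict whose item list is keyed by a list N
lemma pv_keyed_contains {β : Type} (N : List String) (f : String → β) (k : String) :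
    (PySem.Dict.mk (N.map (fun n => (n, f n)))).contains k = decide (k ∈ N) := by
  rw [PySem.Dict.contains_eq_decide_mem_keys]
  simp [PySem.Dict.keys_mk, List.map_map, Function.comp_def]

lemma pv_keyed_getD {β : Type} (N : List String) (f : String → β) (n : String)
    (hn : n ∈ N) (hN : N.Nodup) (d0 : β) :
    (PySem.Dict.mk (N.map (fun m => (m, f m)))).getD n d0 = f n := by
  apply PySem.Dict.getD_of_mem_items
  · exact List.mem_map.mpr ⟨n, hn, rfl⟩
  · simpa [PySem.Dict.keys_mk, List.map_map, Function.comp_def] using hN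

lemma pv_keyed_replace {β : Type} (N : List String) (f : String → β) (k : String) (v : β) :
    (N.map (fun n => (n, f n))).map (fun p => if p.1 == k then (k, v) else p)
      = N.map (fun n => (n, if n = k then v else f n)) := by
  rw [List.map_map]; apply List.map_congr_left; intro n _
  by_cases h : n = k <;> simp [h]

lemma pv_dedup_append (xs : List String) (x : String) :
    PySem.List.dedup (xs ++ [x])
      = if x ∈ xs then PySem.List.dedup xs else PySem.List.dedup xs ++ [x] := by
  simp [PySem.Set.ofList_append_singleton, PySem.Set.add_eq_ite, PySem.Set.mem_ofList]

lemma pv_filter_fst_nil (l : List (String × String × Int × String)) (nom : String)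
    (h : nom ∉ l.map (fun t => t.1)) : l.filter (fun t => t.1 == nom) = [] := by
  rw [List.filter_eq_nil_iff]
  intro t ht hc
  exact h (List.mem_map.mpr ⟨t, ht, by simpa using hc⟩)

lemma pv_filter_pair_nil (l : List (String × String × Int × String)) (nom mat : String)
    (h : mat ∉ (l.filter (fun t => t.1 == nom)).map (fun t => t.2.1)) :
    l.filter (fun t => t.1 == nom && t.2.1 == mat) = [] := by
  rw [List.filter_eq_nil_iff]
  intro t ht hc
  simp only [Bool.and_eq_true, beq_iff_eq] at hc
  exact h (List.mem_map.mpr ⟨t, List.mem_filter.mpr ⟨ht, by simp [hc.1]⟩, hc.2⟩)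

lemma pv_notesOf_append (l : List (String × String × Int × String))
    (x : String × String × Int × String) (nom mat : String) :
    pvNotesOf (l ++ [x]) nom mat
      = pvNotesOf l nom mat ++ (if x.1 = nom ∧ x.2.1 = mat then [x.2.2.1] else []) := by
  simp only [pvNotesOf, List.filter_append, List.map_append]
  congr 1
  by_cases h1 : x.1 = nom <;> by_cases h2 : x.2.1 = mat <;> simp [h1, h2]

lemma pv_inner_append_ne (l : List (String × String × Int × String))
    (x : String × String × Int × String) (n : String) (hne : x.1 ≠ n) :
    pvInner (l ++ [x]) n = pvInner l n := by
  unfold pvInner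
  have h1 : (l ++ [x]).filter (fun t => t.1 == n) = l.filter (fun t => t.1 == n) := by
    simp [List.filter_append, hne]
  rw [h1]
  apply List.map_congr_left
  intro m _
  rw [pv_notesOf_append]
  simp [hne]

lemma pv_inner_append_self (l : List (String × String × Int × String))
    (x : String × String × Int × String) :
    pvInner (l ++ [x]) x.1
      = (PySem.List.dedup ((l.filter (fun t => t.1 == x.1)).map (fun t => t.2.1) ++ [x.2.1])).map
          (fun m => (m, pvNotesOf l x.1 m ++ (if m = x.2.1 then [x.2.2.1] else []))) := by
  unfold pvInner
  have h1 : (l ++ [x]).filter (fun t => t.1 == x.1) = l.filter (fun t => t.1 == x.1) ++ [x] := by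
    simp [List.filter_append]
  rw [h1, List.map_append]
  apply List.map_congr_left
  intro m _
  rw [pv_notesOf_append]
  by_cases h : m = x.2.1
  · simp [h]
  · simp [h, Ne.symm h]

lemma pv_step (l : List (String × String × Int × String))
    (x : String × String × Int × String) :
    pvStepA (pvOuter l) x = pvOuter (l ++ [x]) := by
  obtain ⟨nom, mat, note, g⟩ := x
  have hmap : (l ++ [(nom, mat, note, g)]).map (fun t => t.1) = l.map (fun t => t.1) ++ [nom] := by
    simp
  by_cases h1 : nom ∈ l.map (fun t => t.1)
  · -- student already present
    have hN : nom ∈ PySem.List.dedup (l.map (fun t => t.1)) := by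
      simpa [PySem.List.mem_dedup] using h1
    have hNnd : (PySem.List.dedup (l.map (fun t => t.1))).Nodup :=
      PySem.List.nodup_dedup _
    have hc1 : (pvOuter l).contains nom = true := by
      rw [pvOuter, pv_keyed_contains]; simpa using hN
    have hget : (pvOuter l).getD nom PySem.Dict.empty = PySem.Dict.mk (pvInner l nom) := by
      rw [pvOuter]; exact pv_keyed_getD _ _ _ hN hNnd _
    have hNd' : PySem.List.dedup ((l ++ [(nom, mat, note, g)]).map (fun t => t.1))
        = PySem.List.dedup (l.map (fun t => t.1)) := by
      rw [hmap, pv_dedup_append, if_pos h1]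
    by_cases h2 : mat ∈ (l.filter (fun t => t.1 == nom)).map (fun t => t.2.1)
    · -- subject already present for this student
      have hM : mat ∈ PySem.List.dedup ((l.filter (fun t => t.1 == nom)).map (fun t => t.2.1)) := by
        simpa [PySem.List.mem_dedup] using h2
      have hMnd : (PySem.List.dedup ((l.filter (fun t => t.1 == nom)).map (fun t => t.2.1))).Nodup :=
        PySem.List.nodup_dedup _
      have hc2 : (PySem.Dict.mk (pvInner l nom)).contains mat = true := by
        rw [pvInner, pv_keyed_contains]; simpa using hM
      have hgd : (PySem.Dict.mk (pvInner l nom)).getD mat [] = pvNotesOf l nom mat := by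
        rw [pvInner]; exact pv_keyed_getD _ _ _ hM hMnd _
      simp only [pvStepA]
      rw [if_pos hc1, hget, if_pos hc2, hgd]
      apply PySem.Dict.ext
      rw [PySem.Dict.items_insert_of_contains _ _ hc1]
      have hitems : (pvOuter l).items
          = (PySem.List.dedup (l.map (fun t => t.1))).map
              (fun n => (n, PySem.Dict.mk (pvInner l n))) := rfl
      rw [hitems, pv_keyed_replace]
      have hrhs : (pvOuter (l ++ [(nom, mat, note, g)])).items
          = (PySem.List.dedup (l.map (fun t => t.1))).map
              (fun n => (n, PySem.Dict.mk (pvInner (l ++ [(nom, mat, note, g)]) n))) := by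
        rw [pvOuter, hNd']
      rw [hrhs]
      apply List.map_congr_left
      intro n hn
      by_cases hnn : n = nom
      · subst hnn
        rw [if_pos rfl]
        congr 1
        apply PySem.Dict.ext
        rw [PySem.Dict.items_insert_of_contains _ _ hc2]
        have hinner : pvInner l n
            = (PySem.List.dedup ((l.filter (fun t => t.1 == n)).map (fun t => t.2.1))).map
                (fun m => (m, pvNotesOf l n m)) := rfl
        rw [hinner, pv_keyed_replace]
        have hD : PySem.List.dedup ((l.filter (fun t => t.1 == n)).map (fun t => t.2.1) ++ [mat])
            = PySem.List.dedup ((l.filter (fun t => t.1 == n)).map (fun t => t.2.1)) := by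
          rw [pv_dedup_append, if_pos h2]
        have hself := pv_inner_append_self l (n, mat, note, g)
        simp only at hself
        rw [hself, hD]
        apply List.map_congr_left
        intro m hm
        by_cases hmm : m = mat <;> simp [hmm]
      · have hne : ((nom, mat, note, g) : String × String × Int × String).1 ≠ n :=
          fun h => hnn (h ▸ rfl)
        rw [pv_inner_append_ne l _ n hne]
        simp [hnn]
    · -- new subject for an existing student
      have hc2 : (PySem.Dict.mk (pvInner l nom)).contains mat = false := by
        rw [pvInner, pv_keyed_contains]; simpa [PySem.List.mem_dedup] using h2
      simp only [pvStepA]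
      rw [if_pos hc1, hget, if_neg (by simp [hc2]), PySem.Dict.getD_insert_self,
        List.nil_append]
      apply PySem.Dict.ext
      rw [PySem.Dict.items_insert_of_contains _ _ hc1]
      have hitems : (pvOuter l).items
          = (PySem.List.dedup (l.map (fun t => t.1))).map
              (fun n => (n, PySem.Dict.mk (pvInner l n))) := rfl
      rw [hitems, pv_keyed_replace]
      have hrhs : (pvOuter (l ++ [(nom, mat, note, g)])).items
          = (PySem.List.dedup (l.map (fun t => t.1))).map
              (fun n => (n, PySem.Dict.mk (pvInner (l ++ [(nom, mat, note, g)]) n))) := by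
        rw [pvOuter, hNd']
      rw [hrhs]
      apply List.map_congr_left
      intro n hn
      by_cases hnn : n = nom
      · subst hnn
        rw [if_pos rfl]
        congr 1
        apply PySem.Dict.ext
        rw [PySem.Dict.items_insert_of_contains _ _ (PySem.Dict.contains_insert_self _ _ _)]
        rw [PySem.Dict.items_insert_of_not_contains _ _ hc2]
        rw [List.map_append]
        have hinner : pvInner l n
            = (PySem.List.dedup ((l.filter (fun t => t.1 == n)).map (fun t => t.2.1))).map
                (fun m => (m, pvNotesOf l n m)) := rfl
        rw [hinner, pv_keyed_replace]
        have hD : PySem.List.dedup ((l.filter (fun t => t.1 == n)).map (fun t => t.2.1) ++ [mat])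
            = PySem.List.dedup ((l.filter (fun t => t.1 == n)).map (fun t => t.2.1)) ++ [mat] := by
          rw [pv_dedup_append, if_neg h2]
        have hself := pv_inner_append_self l (n, mat, note, g)
        simp only at hself
        rw [hself, hD, List.map_append]
        have hz : pvNotesOf l n mat = [] := by
          rw [pvNotesOf, pv_filter_pair_nil l n mat h2, List.map_nil]
        congr 1
        · apply List.map_congr_left
          intro m hm
          have hmm : m ≠ mat := fun h => h2 (by
            rw [← PySem.List.mem_dedup]; exact h ▸ hm)
          simp [hmm]
        · simp [hz]
      · have hne : ((nom, mat, note, g) : String × String × Int × String).1 ≠ n :=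
          fun h => hnn (h ▸ rfl)
        rw [pv_inner_append_ne l _ n hne]
        simp [hnn]
  · -- brand-new student
    have hc1 : (pvOuter l).contains nom = false := by
      rw [pvOuter, pv_keyed_contains]; simpa [PySem.List.mem_dedup] using h1
    simp only [pvStepA]
    rw [if_neg (by simp [hc1]), PySem.Dict.getD_insert_self,
      if_neg (by simp [PySem.Dict.contains_empty]), PySem.Dict.getD_insert_self,
      List.nil_append, PySem.Dict.insert_insert_self, PySem.Dict.insert_insert_self]
    apply PySem.Dict.ext
    rw [PySem.Dict.items_insert_of_not_contains _ _ hc1]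
    have hrhs : (pvOuter (l ++ [(nom, mat, note, g)])).items
        = (PySem.List.dedup (l.map (fun t => t.1))).map
            (fun n => (n, PySem.Dict.mk (pvInner (l ++ [(nom, mat, note, g)]) n)))
          ++ [(nom, PySem.Dict.mk (pvInner (l ++ [(nom, mat, note, g)]) nom))] := by
      rw [pvOuter]
      have : PySem.List.dedup ((l ++ [(nom, mat, note, g)]).map (fun t => t.1))
          = PySem.List.dedup (l.map (fun t => t.1)) ++ [nom] := by
        rw [hmap, pv_dedup_append, if_neg h1]
      rw [this, List.map_append, List.map_cons, List.map_nil]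
    rw [hrhs]
    congr 1
    · have hitems : (pvOuter l).items
          = (PySem.List.dedup (l.map (fun t => t.1))).map
              (fun n => (n, PySem.Dict.mk (pvInner l n))) := rfl
      rw [hitems]
      apply List.map_congr_left
      intro n hn
      have hne : ((nom, mat, note, g) : String × String × Int × String).1 ≠ n := by
        intro h
        apply h1
        have h' : nom = n := h
        rw [h']
        simpa [PySem.List.mem_dedup] using hn
      rw [pv_inner_append_ne l _ n hne]
    · have hfst : l.filter (fun t => t.1 == nom) = [] := pv_filter_fst_nil l nom h1
      have hz : pvNotesOf l nom mat = [] := by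
        rw [pvNotesOf, pv_filter_pair_nil l nom mat (by rw [hfst]; simp), List.map_nil]
      have hself := pv_inner_append_self l (nom, mat, note, g)
      simp only at hself
      rw [hself, hfst]
      simp only [List.map_nil, List.nil_append]
      congr 1
      congr 1
      apply PySem.Dict.ext
      rw [PySem.Dict.items_insert_of_not_contains _ _ (PySem.Dict.contains_empty _)]
      have : PySem.List.dedup ([mat]) = [mat] := rfl
      rw [this]
      simp [hz]
      rfl

theorem pv_invariant (l : List (String × String × Int × String)) :
    l.foldl pvStepA PySem.Dict.empty = pvOuter l := by
  induction l using List.reverseRecOn with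
  | nil => rfl
  | append_singleton l x ih => rw [List.foldl_append, List.foldl_cons, List.foldl_nil, ih, pv_step]

-- ===== VERDICT (by name: the statement is the Claim_ definition above) =====
theorem construire_notes_par_etudiant_spec : Claim_equal_construire_notes_par_etudiant := by
  intro valides _
  unfold Spec_construire_notes_par_etudiant construire_notes_par_etudiant construire_notes_par_etudiant_alt
  rw [pv_invariant]
  simp [pvOuter, pvInner, pvNotesOf, List.map_map, Function.comp_def]
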